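-- pv_equiv track=rewrite | github.com/kwrobel-nlp/kftt | test_data_tagging.py | segments_to_tokens
-- ===== SOURCE A (Python) =====
-- def segments_to_tokens(segments):
--     tokens = []
--     token = ''
--     for char, pred, space_before in segments:
--         if token != '':
--             if space_before==1:
--                 token+=' '
--
--         token += char
--
--         #TODO brakuje info o spacjach, jeśli klasyfikator nie podzielił przy spacji: "dowolny'czas'"
--         # a powinno być "dowolny 'czas'" - prawdopodobnie fix ambig to załatwia
--         if pred >= 1:
--             tokens.append(token)
--             token = ''
--     assert token==''
--     return tokens
-- ===== SOURCE B (Python) =====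
-- def _join(group):
--     return ''.join(' ' + char if i > 0 and space_before == 1 else char
--                    for i, (char, _pred, space_before) in enumerate(group))
--
--
-- def segments_to_tokens(segments):
--     tokens = []
--     group = []
--     for seg in segments:
--         group.append(seg)
--         if seg[1] >= 1:
--             tokens.append(_join(group))
--             group = []
--     assert not group
--     return tokens
-- ===== Notes on version B (the rewrite author's own statement) =====
-- stated objective: alternative
-- what changed: A builds tokens with one running-string accumulator mutated inside a single loop; B partitions the segments into groups ending at each pred>=1 and joins each group positionally (space before every non-first piece with space_before==1); Pre_ excludes lists where a token group starts with an empty-char segment, a degenerate corner where A keys the space and the final assert on string emptiness while B keys them on segment position and either reading is defensible, and lists on which A's final assert raises.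
-- outside the precondition, e.g. on segments_to_tokens([('', 0, 1), ('a', 1, 1)]): A returns ['a'], B returns [' a']; on segments_to_tokens([('a', 1, 0), ('', 0, 0)]): A returns ['a'], B raises AssertionError
import Mathlib
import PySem

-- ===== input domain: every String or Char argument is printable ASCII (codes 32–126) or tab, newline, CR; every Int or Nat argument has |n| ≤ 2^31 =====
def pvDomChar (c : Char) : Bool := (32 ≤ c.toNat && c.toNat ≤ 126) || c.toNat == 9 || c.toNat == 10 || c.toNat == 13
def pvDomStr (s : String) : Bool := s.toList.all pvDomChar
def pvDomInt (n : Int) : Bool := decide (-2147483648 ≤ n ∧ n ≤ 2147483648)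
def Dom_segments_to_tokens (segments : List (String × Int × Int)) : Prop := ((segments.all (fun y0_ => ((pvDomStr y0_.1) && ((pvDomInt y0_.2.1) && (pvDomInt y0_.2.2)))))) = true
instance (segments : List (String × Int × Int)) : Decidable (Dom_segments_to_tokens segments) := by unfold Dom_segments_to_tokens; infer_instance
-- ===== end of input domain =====

-- B replaces A's single running-string accumulator by a group-then-join decomposition
-- (objective: alternative); equivalence is claimed on Pre_ below.

-- ===== PORT A =====
-- one iteration of A's for-loop: state = (tokens, token)
def pvStepA (st : List String × String) (seg : String × Int × Int) : List String × String :=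
  let token := if st.2 ≠ "" then (if seg.2.2 == 1 then st.2 ++ " " else st.2) else st.2
  let token := token ++ seg.1
  if seg.2.1 ≥ 1 then (st.1 ++ [token], "") else (st.1, token)

def segments_to_tokens (segments : List (String × Int × Int)) : List String :=
  (segments.foldl pvStepA ([], "")).1

-- ===== PORT B =====
-- _join: space before every non-first piece whose space_before is 1
def pvJoin (g : List (String × Int × Int)) : String :=
  String.join ((PySem.List.enumerate g).map
    (fun p => if p.1 > 0 && p.2.2.2 == 1 then " " ++ p.2.1 else p.2.1))

-- one iteration of B's loop: state = (tokens, group)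
def pvStepB (st : List String × List (String × Int × Int)) (seg : String × Int × Int) :
    List String × List (String × Int × Int) :=
  let group := st.2 ++ [seg]
  if seg.2.1 ≥ 1 then (st.1 ++ [pvJoin group], []) else (st.1, group)

def segments_to_tokens_alt (segments : List (String × Int × Int)) : List String :=
  (segments.foldl pvStepB ([], [])).1

-- ===== PRECONDITION & SPEC =====
-- Pre_ excludes (a) the inputs on which A's final `assert token == ''` raises AssertionError
-- (a trailing group after the last pred>=1), and (b) lists where a token group STARTS with an
-- empty-char segment (index 0, or right after a pred>=1 segment): on that degenerate corner A
-- keys the space insertion and the final assert on string emptiness while B keys them on segment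
-- position, and either reading is defensible.
def Pre_segments_to_tokens (segments : List (String × Int × Int)) : Prop :=
  (segments.head?.all (fun s => s.1 != "")) = true ∧
  List.IsChain (fun p q => 1 ≤ p.2.1 → q.1 ≠ "") segments ∧
  (segments.getLast?.all (fun s => decide (1 ≤ s.2.1))) = true
instance (segments : List (String × Int × Int)) : Decidable (Pre_segments_to_tokens segments) := by
  unfold Pre_segments_to_tokens; infer_instance
def pvWitness_segments_to_tokens : (List (String × Int × Int)) :=
  [("ab", 0, 0), ("c", 1, 1), ("d", 2, 0)]
def Spec_segments_to_tokens (segments : List (String × Int × Int)) (out : List String) : Prop := out = segments_to_tokens_alt segments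
instance (segments : List (String × Int × Int)) (out : List String) : Decidable (Spec_segments_to_tokens segments out) := by unfold Spec_segments_to_tokens; infer_instance

-- ===== CLAIM =====
def Claim_equal_segments_to_tokens : Prop := ∀ (segments : List (String × Int × Int)), Dom_segments_to_tokens segments → Pre_segments_to_tokens segments → Spec_segments_to_tokens segments (segments_to_tokens segments)

-- ===== LEMMAS AND PROOFS =====

theorem join_snoc (l : List String) (s : String) :
    String.join (l ++ [s]) = String.join l ++ s := by simp [String.join]

-- joining a group extended by one segment
theorem pvJoin_snoc (g : List (String × Int × Int)) (seg : String × Int × Int) :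
    pvJoin (g ++ [seg]) =
      pvJoin g ++ (if g ≠ [] ∧ seg.2.2 == 1 then " " ++ seg.1 else seg.1) := by
  unfold pvJoin
  rw [PySem.List.enumerate_append]
  simp only [PySem.List.enumerate_cons, PySem.List.enumerate_nil, List.map_append,
    List.map_cons, List.map_nil, join_snoc]
  congr 1
  by_cases h : g = []
  · subst h; simp
  · have hlen : 0 < g.length := List.length_pos_iff.mpr h
    simp [h, hlen]

-- extending a group keeps its join non-empty
theorem pvJoin_snoc_ne (g : List (String × Int × Int)) (seg : String × Int × Int)
    (h : pvJoin g ≠ "") : pvJoin (g ++ [seg]) ≠ "" := by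
  rw [pvJoin_snoc]
  intro hc
  rw [String.append_eq_empty_iff] at hc
  exact h hc.1

theorem pvJoin_singleton (seg : String × Int × Int) : pvJoin [seg] = seg.1 := by
  simp [pvJoin, PySem.List.enumerate_cons, PySem.List.enumerate_nil, String.join]

-- main invariant: A's fold state is (same tokens, join of B's pending group)
theorem main_inv (segs : List (String × Int × Int)) (tokens : List String)
    (cur : List (String × Int × Int)) (hcur : cur ≠ [] → pvJoin cur ≠ "")
    (hhead : cur = [] → ∀ s ∈ segs.head?, s.1 ≠ "")
    (hchain : List.IsChain (fun p q => 1 ≤ p.2.1 → q.1 ≠ "") segs) :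
    (segs.foldl pvStepA (tokens, pvJoin cur)).1 = (segs.foldl pvStepB (tokens, cur)).1 := by
  induction segs generalizing tokens cur with
  | nil => simp
  | cons seg rest ih =>
    simp only [List.foldl_cons]
    have hupd : (if pvJoin cur ≠ "" then (if seg.2.2 == 1 then pvJoin cur ++ " " else pvJoin cur)
        else pvJoin cur) ++ seg.1 = pvJoin (cur ++ [seg]) := by
      rw [pvJoin_snoc]
      by_cases hc : cur = []
      · subst hc; simp [pvJoin, String.join]
      · have h1 : pvJoin cur ≠ "" := hcur hc
        simp only [if_pos h1, hc, ne_eq, not_false_iff, true_and]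
        by_cases h2 : seg.2.2 == 1
        · simp [h2, String.append_assoc]
        · simp [h2]
    obtain ⟨hrel, hchain'⟩ := List.isChain_cons.mp hchain
    have hcur' : cur ++ [seg] ≠ [] → pvJoin (cur ++ [seg]) ≠ "" := by
      intro _
      by_cases hc : cur = []
      · subst hc
        simp only [List.nil_append, pvJoin_singleton]
        exact hhead rfl seg (by simp)
      · exact pvJoin_snoc_ne cur seg (hcur hc)
    show (rest.foldl pvStepA (pvStepA (tokens, pvJoin cur) seg)).1
        = (rest.foldl pvStepB (pvStepB (tokens, cur) seg)).1
    unfold pvStepA pvStepB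
    simp only [hupd]
    by_cases h : seg.2.1 ≥ 1
    · simp only [if_pos h]
      have h0 : ("" : String) = pvJoin ([] : List (String × Int × Int)) := rfl
      rw [h0]
      exact ih (tokens ++ [pvJoin (cur ++ [seg])]) []
        (fun hc => absurd rfl hc) (fun _ s hs => hrel s hs h) hchain'
    · simp only [if_neg h]
      exact ih tokens (cur ++ [seg]) hcur' (fun hc => absurd hc (by simp)) hchain'

-- ===== VERDICT =====
theorem segments_to_tokens_spec : Claim_equal_segments_to_tokens := by
  intro segments _ hpre
  unfold Spec_segments_to_tokens segments_to_tokens segments_to_tokens_alt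
  have hhead : ∀ s ∈ segments.head?, s.1 ≠ "" := by
    intro s hs
    have := (Option.all_eq_true _ _).mp hpre.1 s hs
    simpa using this
  have h0 : ("" : String) = pvJoin ([] : List (String × Int × Int)) := rfl
  rw [h0]
  exact main_inv segments [] [] (fun hc => absurd rfl hc) (fun _ => hhead) hpre.2.1
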